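-- pv_equiv track=rewrite | github.com/mmh132/ProjectEuler | util/iops.py | sumpow
-- ===== SOURCE A (Python) =====
-- from math import comb
--
-- def sumpow(n, exp, mod = 0):
--     rv = 0
--     if n > exp:
--         for i in range(1, exp+1):
--             for j in range(i):
--                 rv += pow(-1, j)*pow(i-j, exp)*comb(n+exp-i+1, n-i)*comb(exp+1, j)
--                 if mod: rv %= mod
--     else:
--         for i in range(1,n+1):
--             rv += pow(i, exp)
--             if mod: rv %= mod
--     return rv
-- ===== SOURCE B (Python) =====
-- from math import comb, factorial
--
-- def sumpow(n, exp, mod=0):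
--     rv = 0
--     if 0 <= exp < n:
--         # closed form: i**exp = sum_k S2(exp,k)*k!*C(i,k) (Stirling numbers of
--         # the 2nd kind), so the sum over i = 1..n telescopes by the hockey-stick
--         # identity to sum_k S2(exp,k)*k!*C(n+1,k+1)
--         if exp == 0:
--             rv = n
--         else:
--             row = [0, 1]  # S2(1, k) for k = 0..1
--             for p in range(2, exp + 1):
--                 row = [0] + [row[k - 1] + k * row[k] for k in range(1, p)] + [1]
--             rv = sum(row[k] * factorial(k) * comb(n + 1, k + 1) for k in range(1, exp + 1))
--         if mod:
--             rv %= mod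
--     else:
--         for i in range(1, n + 1):
--             rv += i ** exp
--             if mod:
--                 rv %= mod
--     return rv
-- ===== Notes on version B (the rewrite author's own statement) =====
-- stated objective: alternative
-- what changed: For n > exp, A evaluates an Eulerian-number closed form (double loop of alternating terms pow(-1,j)*pow(i-j,exp)*comb(n+exp-i+1,n-i)*comb(exp+1,j), two large comb calls per term); B instead builds the Stirling numbers of the second kind S2(exp,k) by their Pascal-style DP recurrence (small-int additions) and sums S2(exp,k)*k!*comb(n+1,k+1) via the hockey-stick identity with only exp comb calls, keeping the plain loop otherwise.
-- intended difference: For exp = 0 and n >= 1 (with mod not dividing n) A's formula loop 'range(1, exp+1)' is empty and A returns 0, although the sum of i**0 for i = 1..n is n; B returns n (reduced mod mod when mod is nonzero), the intended value. — e.g. on sumpow(3, 0, 0): A returns 0, B returns 3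
-- outside the precondition, e.g. on sumpow(3, -2, 0): A returns 0, B returns 1.3611111111111112
import Mathlib
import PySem

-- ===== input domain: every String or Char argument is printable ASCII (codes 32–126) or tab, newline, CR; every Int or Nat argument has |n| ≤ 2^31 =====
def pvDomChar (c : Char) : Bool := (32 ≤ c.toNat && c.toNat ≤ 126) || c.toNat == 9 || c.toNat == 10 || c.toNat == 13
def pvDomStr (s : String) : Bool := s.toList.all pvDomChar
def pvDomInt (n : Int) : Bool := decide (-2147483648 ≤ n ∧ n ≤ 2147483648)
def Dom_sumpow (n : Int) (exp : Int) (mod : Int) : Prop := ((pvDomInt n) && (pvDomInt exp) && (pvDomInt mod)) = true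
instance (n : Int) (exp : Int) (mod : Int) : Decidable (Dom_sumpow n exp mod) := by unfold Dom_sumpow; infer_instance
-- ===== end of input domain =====

-- B replaces A's Eulerian-number closed form (double loop of alternating binomial
-- terms for n > exp) by a different closed form via Stirling numbers of the second
-- kind and the hockey-stick identity; on exp = 0, n ≥ 1 it intentionally returns
-- n (mod mod) where A returns 0.

-- ===== PORT A =====
-- math.comb(a, b): exact for 0 ≤ a and 0 ≤ b, which are the only arguments
-- either program's loops ever pass inside Pre_ (Python raises ValueError on negatives).
def pyComb (a : Int) (b : Int) : Int := (Nat.choose a.toNat b.toNat : Int)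

-- pow(x, e) is ported as x ^ e.toNat: whenever a loop body runs inside Pre_,
-- exp ≥ 1, so this is exact there.
def sumpow (n : Int) (exp : Int) (mod : Int) : Int :=
  if n > exp then
    (PySem.List.pyRange 1 (exp + 1) 1).foldl (fun rv i =>
      (PySem.List.pyRange 0 i 1).foldl (fun rv j =>
        let rv := rv + (-1 : Int) ^ j.toNat * (i - j) ^ exp.toNat *
          pyComb (n + exp - i + 1) (n - i) * pyComb (exp + 1) j
        if mod ≠ 0 then PySem.Int.mod rv mod else rv) rv) 0
  else
    (PySem.List.pyRange 1 (n + 1) 1).foldl (fun rv i =>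
      let rv := rv + i ^ exp.toNat
      if mod ≠ 0 then PySem.Int.mod rv mod else rv) 0

-- ===== PORT B =====
-- Source B's row indices k-1, k and all comb/factorial arguments are provably in
-- range / nonnegative wherever they are evaluated, so pyGetD/pyComb are exact.
def sumpow_alt (n : Int) (exp : Int) (mod : Int) : Int :=
  if 0 ≤ exp ∧ exp < n then
    let rv : Int :=
      if exp = 0 then n
      else
        let row : List Int := (PySem.List.pyRange 2 (exp + 1) 1).foldl
          (fun row p => [0] ++ (PySem.List.pyRange 1 p 1).map (fun k =>
            PySem.List.pyGetD row (k - 1) 0 + k * PySem.List.pyGetD row k 0) ++ [(1 : ℤ)])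
          [0, 1]
        ((PySem.List.pyRange 1 (exp + 1) 1).map (fun k =>
          PySem.List.pyGetD row k 0 * ((k.toNat.factorial : ℕ) : Int) * pyComb (n + 1) (k + 1))).sum
    if mod ≠ 0 then PySem.Int.mod rv mod else rv
  else
    (PySem.List.pyRange 1 (n + 1) 1).foldl (fun rv i =>
      let rv := rv + i ^ exp.toNat
      if mod ≠ 0 then PySem.Int.mod rv mod else rv) 0

-- ===== PRECONDITION & SPEC =====
-- Pre_ excludes exp < 0 with n ≥ 1, where the power sum is not an integer:
-- A's empty formula loop accidentally returns int 0 there, while B's direct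
-- loop computes float powers and returns a value outside the declared int type.
def Pre_sumpow (n : Int) (exp : Int) (mod : Int) : Prop := 0 ≤ exp ∨ n ≤ 0
instance (n : Int) (exp : Int) (mod : Int) : Decidable (Pre_sumpow n exp mod) := by
  unfold Pre_sumpow; infer_instance
def pvWitness_sumpow : Int × Int × Int := (4, 2, 0)

-- On exp = 0 and 1 ≤ n (and mod not dividing n) A's formula loop range(1, exp+1)
-- is empty so A returns 0, although sum of i**0 for i = 1..n is n; B returns n
-- (reduced mod mod when mod ≠ 0), the intended value.
def D_sumpow (n : Int) (exp : Int) (mod : Int) : Prop := exp = 0 ∧ 1 ≤ n ∧ ¬ (mod ∣ n)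
instance (n : Int) (exp : Int) (mod : Int) : Decidable (D_sumpow n exp mod) := by
  unfold D_sumpow; infer_instance

def Spec_sumpow (n : Int) (exp : Int) (mod : Int) (out : Int) : Prop :=
  ¬ D_sumpow n exp mod → out = sumpow_alt n exp mod
instance (n : Int) (exp : Int) (mod : Int) (out : Int) : Decidable (Spec_sumpow n exp mod out) := by
  unfold Spec_sumpow; infer_instance

def pvDiffWitness_sumpow : Int × Int × Int := (3, 0, 0)
def pvDiffWitnessOut_sumpow : Int × Int := (0, 3)

-- ===== CLAIM (what is proved, stated in full; the proofs are below) =====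
def Claim_unchanged_sumpow : Prop := ∀ (n : Int) (exp : Int) (mod : Int),
  Dom_sumpow n exp mod → Pre_sumpow n exp mod → Spec_sumpow n exp mod (sumpow n exp mod)
def Claim_changed_sumpow : Prop :=
  Dom_sumpow (pvDiffWitness_sumpow.1) (pvDiffWitness_sumpow.2.1) (pvDiffWitness_sumpow.2.2) ∧
  Pre_sumpow (pvDiffWitness_sumpow.1) (pvDiffWitness_sumpow.2.1) (pvDiffWitness_sumpow.2.2) ∧
  D_sumpow (pvDiffWitness_sumpow.1) (pvDiffWitness_sumpow.2.1) (pvDiffWitness_sumpow.2.2) ∧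
  sumpow (pvDiffWitness_sumpow.1) (pvDiffWitness_sumpow.2.1) (pvDiffWitness_sumpow.2.2) = pvDiffWitnessOut_sumpow.1 ∧
  sumpow_alt (pvDiffWitness_sumpow.1) (pvDiffWitness_sumpow.2.1) (pvDiffWitness_sumpow.2.2) = pvDiffWitnessOut_sumpow.2 ∧
  pvDiffWitnessOut_sumpow.1 ≠ pvDiffWitnessOut_sumpow.2
def Claim_exact_sumpow : Prop := ∀ (n : Int) (exp : Int) (mod : Int),
  Dom_sumpow n exp mod → Pre_sumpow n exp mod → D_sumpow n exp mod →
  sumpow n exp mod ≠ sumpow_alt n exp mod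

-- ===== LEMMAS AND PROOFS =====

-- ---- shared binomial-coefficient facts ----

lemma chooseZ_succ_right (q j : ℕ) :
    ((j : ℤ) + 1) * (q.choose (j + 1) : ℤ) = ((q : ℤ) - j) * (q.choose j : ℤ) := by
  by_cases h : j + 1 ≤ q
  · have hn := Nat.choose_succ_right_eq q j
    have hc : ((q.choose (j+1) * (j+1) : ℕ) : ℤ) = ((q.choose j * (q - j) : ℕ) : ℤ) := by
      exact_mod_cast congrArg (Nat.cast : ℕ → ℤ) hn
    push_cast [Nat.cast_sub (by omega : j ≤ q)] at hc
    linarith [hc]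
  · by_cases h' : j = q
    · subst h'; simp
    · have hz1 : q.choose (j+1) = 0 := Nat.choose_eq_zero_of_lt (by omega)
      have hz2 : q.choose j = 0 := Nat.choose_eq_zero_of_lt (by omega)
      simp [hz1, hz2]

lemma sum_map_range_eq (m : ℕ) (f : ℕ → ℤ) :
    ((List.range m).map f).sum = ∑ k ∈ Finset.range m, f k := rfl

-- ---- A's side: the Eulerian-number alternating sum computed by A's inner loop ----

def Eul (p i : ℕ) : ℤ :=
  ∑ j ∈ Finset.range i, (-1 : ℤ) ^ j * (((p + 1).choose j : ℕ) : ℤ) * (((i - j : ℕ) : ℤ)) ^ p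

lemma Eul_zero' (p : ℕ) : Eul p 0 = 0 := by simp [Eul]

lemma Eul_one_one : Eul 1 1 = 1 := by decide

lemma choose_split (q j : ℕ) (z : ℤ) :
    (z - ((j : ℤ) + 1)) * ((q + 1).choose (j + 1) : ℤ)
      = z * (q.choose (j + 1) : ℤ) - ((q : ℤ) + 1 - z) * (q.choose j : ℤ) := by
  have h := chooseZ_succ_right q j
  have hp : (((q + 1).choose (j + 1) : ℕ) : ℤ) = (q.choose j : ℤ) + (q.choose (j + 1) : ℤ) := by
    exact_mod_cast congrArg (Nat.cast : ℕ → ℤ) (Nat.choose_succ_succ q j)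
  linear_combination (z - ((j : ℤ) + 1)) * hp - h

lemma Eul_rec (q k : ℕ) :
    Eul (q + 1) (k + 1) = ((k : ℤ) + 1) * Eul q (k + 1) + ((q : ℤ) + 1 - k) * Eul q k := by
  unfold Eul
  rw [Finset.sum_range_succ',
    Finset.sum_range_succ' (fun j => (-1 : ℤ) ^ j * ((q + 1).choose j : ℤ) * (((k + 1 - j : ℕ) : ℤ)) ^ q)]
  have hterm : ∀ j ∈ Finset.range k,
      (-1 : ℤ) ^ (j + 1) * ((q + 1 + 1).choose (j + 1) : ℤ) * (((k + 1 - (j + 1) : ℕ) : ℤ)) ^ (q + 1)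
        = ((k : ℤ) + 1) * ((-1 : ℤ) ^ (j + 1) * ((q + 1).choose (j + 1) : ℤ) * (((k + 1 - (j + 1) : ℕ) : ℤ)) ^ q)
          + ((q : ℤ) + 1 - k) * ((-1 : ℤ) ^ j * ((q + 1).choose j : ℤ) * (((k - j : ℕ) : ℤ)) ^ q) := by
    intro j hj
    have hjk : j < k := Finset.mem_range.mp hj
    rw [Nat.succ_sub_succ]
    have hc : (((k - j : ℕ) : ℤ)) = (k : ℤ) - j := by
      push_cast [Nat.cast_sub (le_of_lt hjk)]; ring
    have hs := choose_split (q + 1) j ((k : ℤ) + 1)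
    push_cast at hs
    rw [hc]
    linear_combination ((-1 : ℤ) ^ (j + 1) * ((k : ℤ) - j) ^ q) * hs
  rw [Finset.sum_congr rfl hterm, Finset.sum_add_distrib, ← Finset.mul_sum, ← Finset.mul_sum]
  simp only [pow_zero, Nat.choose_zero_right, Nat.cast_one, Nat.sub_zero, one_mul]
  push_cast
  ring

lemma Eul_one_vanish (i : ℕ) (hi : 2 ≤ i) : Eul 1 i = 0 := by
  unfold Eul
  have hsub : Finset.range 3 ⊆ Finset.range i ∨ i = 2 := by
    rcases Nat.lt_or_ge i 3 with h | h
    · right; omega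
    · left; intro x hx; simp only [Finset.mem_range] at hx ⊢; omega
  rcases hsub with h | rfl
  · rw [← Finset.sum_subset h (by
      intro j hj hnj
      have : 2 < j := by
        simp only [Finset.mem_range] at hj hnj; omega
      simp [Nat.choose_eq_zero_of_lt this])]
    have h3 : 3 ≤ i := by
      have := h (Finset.mem_range.mpr (by omega : (2:ℕ) < 3)); simp at this; omega
    simp [Finset.sum_range_succ]
    push_cast [Nat.cast_sub (by omega : 1 ≤ i), Nat.cast_sub (by omega : 2 ≤ i)]
    ring
  · decide

lemma Eul_vanish : ∀ p : ℕ, 1 ≤ p → ∀ i : ℕ, p + 1 ≤ i → Eul p i = 0 := by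
  intro p hp
  induction p, hp using Nat.le_induction with
  | base => exact fun i hi => Eul_one_vanish i hi
  | succ p hp ih =>
    intro i hi
    obtain ⟨k, rfl⟩ : ∃ k, i = k + 1 := ⟨i - 1, by omega⟩
    rw [Eul_rec, ih (k + 1) (by omega), ih k (by omega)]
    ring

-- x * C(m, p) = (t+1) * C(m+1, p+1) + (p-t) * C(m, p+1)  when x + p = m + t + 1
lemma x_mul_choose (m p t : ℕ) (x : ℤ) (hx : x + p = (m : ℤ) + t + 1) :
    x * (m.choose p : ℤ)
      = ((t : ℤ) + 1) * ((m + 1).choose (p + 1) : ℤ) + ((p : ℤ) - t) * (m.choose (p + 1) : ℤ) := by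
  have h1 := chooseZ_succ_right m p
  have h2 : (((m + 1).choose (p + 1) : ℕ) : ℤ) = (m.choose p : ℤ) + (m.choose (p + 1) : ℤ) := by
    exact_mod_cast congrArg (Nat.cast : ℕ → ℤ) (Nat.choose_succ_succ m p)
  linear_combination (m.choose p : ℤ) * hx - ((t : ℤ) + 1) * h2 - h1

lemma worpitzky : ∀ p : ℕ, 1 ≤ p → ∀ x : ℕ,
    (x : ℤ) ^ p = ∑ i ∈ Finset.range p, Eul p (i + 1) * (((x + (p - 1 - i)).choose p : ℕ) : ℤ) := by
  intro p hp
  induction p, hp using Nat.le_induction with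
  | base =>
    intro x
    simp [Eul_one_one, Nat.choose_one_right]
  | succ p hp ih =>
    intro x
    have hEulrw : ∀ t ∈ Finset.range (p+1),
        Eul (p+1) (t+1) * (((x + (p + 1 - 1 - t)).choose (p+1) : ℕ) : ℤ)
          = ((t:ℤ)+1) * Eul p (t+1) * (((x + (p - t)).choose (p+1) : ℕ) : ℤ)
            + ((((p:ℤ)+1) - t) * (Eul p t * (((x + (p - t)).choose (p+1) : ℕ) : ℤ))) := by
      intro t ht
      have h0 : p + 1 - 1 - t = p - t := by omega
      rw [h0, Eul_rec]
      ring
    rw [Finset.sum_congr rfl hEulrw, Finset.sum_add_distrib, Finset.sum_range_succ,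
      Finset.sum_range_succ' (fun t => (((p:ℤ)+1) - t) * (Eul p t * (((x + (p - t)).choose (p+1) : ℕ) : ℤ)))]
    have hv : Eul p (p+1) = 0 := Eul_vanish p hp (p+1) (le_refl _)
    simp only [hv, Eul_zero', Nat.cast_zero, sub_zero, mul_zero, zero_mul, add_zero, Nat.sub_self]
    have hmain : ∀ t ∈ Finset.range p,
        Eul p (t+1) * ((x:ℤ) * (((x + (p - 1 - t)).choose p : ℕ) : ℤ))
          = ((t:ℤ)+1) * Eul p (t+1) * (((x + (p - t)).choose (p+1) : ℕ) : ℤ)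
            + (((p:ℤ)+1) - ((t:ℤ)+1)) * (Eul p (t+1) * (((x + (p - (t+1))).choose (p+1) : ℕ) : ℤ)) := by
      intro t ht
      have htp : t < p := Finset.mem_range.mp ht
      have hm1 : x + (p - 1 - t) + 1 = x + (p - t) := by omega
      have hx : (x:ℤ) + p = ((x + (p - 1 - t) : ℕ) : ℤ) + t + 1 := by push_cast; omega
      have hxc := x_mul_choose (x + (p - 1 - t)) p t (x:ℤ) hx
      rw [hm1] at hxc
      have h2 : p - (t+1) = p - 1 - t := by omega
      rw [h2]
      linear_combination Eul p (t+1) * hxc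
    calc (x:ℤ)^(p+1)
        = (∑ t ∈ Finset.range p, Eul p (t+1) * (((x + (p - 1 - t)).choose p : ℕ) : ℤ)) * x := by
          rw [pow_succ, ih]
      _ = ∑ t ∈ Finset.range p, Eul p (t+1) * ((x:ℤ) * (((x + (p - 1 - t)).choose p : ℕ) : ℤ)) := by
          rw [Finset.sum_mul]; exact Finset.sum_congr rfl (fun t _ => by ring)
      _ = ∑ t ∈ Finset.range p, (((t:ℤ)+1) * Eul p (t+1) * (((x + (p - t)).choose (p+1) : ℕ) : ℤ)
            + (((p:ℤ)+1) - ((t:ℤ)+1)) * (Eul p (t+1) * (((x + (p - (t+1))).choose (p+1) : ℕ) : ℤ))) :=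
          Finset.sum_congr rfl hmain
      _ = _ := by rw [Finset.sum_add_distrib]; push_cast; ring

lemma sum_pows (p : ℕ) (hp : 1 ≤ p) : ∀ N : ℕ,
    ∑ x ∈ Finset.range N, ((x : ℤ) + 1) ^ p
      = ∑ i ∈ Finset.range p, Eul p (i + 1) * (((N + (p - i)).choose (p + 1) : ℕ) : ℤ) := by
  intro N
  induction N with
  | zero =>
    simp only [Finset.range_zero, Finset.sum_empty]
    symm
    refine Finset.sum_eq_zero (fun i hi => ?_)
    have h0 : (p - i).choose (p + 1) = 0 := Nat.choose_eq_zero_of_lt (by omega)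
    simp [h0]
  | succ N ih =>
    rw [Finset.sum_range_succ, ih]
    have hsplit : ∀ i ∈ Finset.range p,
        Eul p (i + 1) * (((N + 1 + (p - i)).choose (p + 1) : ℕ) : ℤ)
          = Eul p (i + 1) * (((N + (p - i)).choose (p + 1) : ℕ) : ℤ)
            + Eul p (i + 1) * (((N + (p - i)).choose p : ℕ) : ℤ) := by
      intro i hi
      have harg : N + 1 + (p - i) = (N + (p - i)) + 1 := by omega
      have hc : (((N + (p - i)) + 1).choose (p + 1) : ℕ)
          = (N + (p - i)).choose p + (N + (p - i)).choose (p + 1) := Nat.choose_succ_succ _ p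
      rw [harg, hc]
      push_cast
      ring
    rw [Finset.sum_congr rfl hsplit, Finset.sum_add_distrib]
    have hw := worpitzky p hp (N + 1)
    have hrw : ∀ i ∈ Finset.range p,
        Eul p (i + 1) * (((N + 1 + (p - 1 - i)).choose p : ℕ) : ℤ)
          = Eul p (i + 1) * (((N + (p - i)).choose p : ℕ) : ℤ) := by
      intro i hi
      have : N + 1 + (p - 1 - i) = N + (p - i) := by
        have := Finset.mem_range.mp hi; omega
      rw [this]
    rw [Finset.sum_congr rfl hrw] at hw
    push_cast at hw
    rw [← hw]

-- a fold that reduces mod m after each addition ends at the reduced total (nonempty list)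
lemma foldl_mod_sum (m : ℤ) (g : Int → Int) :
    ∀ (l : List Int) (r : Int), l ≠ [] →
      l.foldl (fun rv t => PySem.Int.mod (rv + g t) m) r = PySem.Int.mod (r + (l.map g).sum) m := by
  intro l
  induction l with
  | nil => intro r h; exact absurd rfl h
  | cons t ts ih =>
    intro r _
    rcases eq_or_ne ts [] with rfl | hne
    · simp
    · rw [List.foldl_cons, ih _ hne, List.map_cons, List.sum_cons]
      simp only [PySem.Int.mod]
      rw [Int.fmod_add_fmod]
      ring_nf

-- A's formula-branch total equals the direct power-sum total (no mod), for 1 ≤ exp < n.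
lemma key_formula (n exp : Int) (h1 : 1 ≤ exp) (h2 : exp < n) :
    ((PySem.List.pyRange 1 (exp + 1) 1).map (fun i =>
        ((PySem.List.pyRange 0 i 1).map (fun j =>
          (-1 : Int) ^ j.toNat * (i - j) ^ exp.toNat *
            pyComb (n + exp - i + 1) (n - i) * pyComb (exp + 1) j)).sum)).sum
      = ((PySem.List.pyRange 1 (n + 1) 1).map (fun i => i ^ exp.toNat)).sum := by
  obtain ⟨p, rfl⟩ : ∃ p : ℕ, exp = (p : ℤ) := ⟨exp.toNat, (Int.toNat_of_nonneg (by omega)).symm⟩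
  obtain ⟨N, rfl⟩ : ∃ N : ℕ, n = (N : ℤ) := ⟨n.toNat, (Int.toNat_of_nonneg (by omega)).symm⟩
  have hp : 1 ≤ p := by exact_mod_cast h1
  have hpN : p < N := by exact_mod_cast h2
  rw [PySem.List.pyRange_one 1 ((p : ℤ) + 1), PySem.List.pyRange_one 1 ((N : ℤ) + 1)]
  have e1 : (((p : ℤ) + 1) - 1).toNat = p := by omega
  have e2 : (((N : ℤ) + 1) - 1).toNat = N := by omega
  rw [e1, e2, List.map_map, List.map_map, sum_map_range_eq, sum_map_range_eq]
  simp only [Function.comp_apply, Int.toNat_natCast]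
  have hL : ∀ a ∈ Finset.range p,
      ((PySem.List.pyRange 0 (1 + (a : ℤ)) 1).map (fun j =>
          (-1 : ℤ) ^ j.toNat * ((1 + (a : ℤ)) - j) ^ p *
            pyComb ((N : ℤ) + (p : ℤ) - (1 + (a : ℤ)) + 1) ((N : ℤ) - (1 + (a : ℤ))) *
            pyComb ((p : ℤ) + 1) j)).sum
        = Eul p (a + 1) * (((N + (p - a)).choose (p + 1) : ℕ) : ℤ) := by
    intro a ha
    have haW : a < p := Finset.mem_range.mp ha
    rw [PySem.List.pyRange_one 0 (1 + (a : ℤ))]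
    have e4 : ((1 + (a : ℤ)) - 0).toNat = a + 1 := by omega
    rw [e4, List.map_map, sum_map_range_eq]
    unfold Eul
    rw [Finset.sum_mul]
    refine Finset.sum_congr rfl (fun j hj => ?_)
    have hja : j < a + 1 := Finset.mem_range.mp hj
    have hT : ((N : ℤ) + (p : ℤ) - (1 + (a : ℤ)) + 1).toNat = N + (p - a) := by omega
    have hB : ((N : ℤ) - (1 + (a : ℤ))).toNat = (N + (p - a)) - (p + 1) := by omega
    have hPB : ((p : ℤ) + 1).toNat = p + 1 := by omega
    have hcs : (N + (p - a)).choose ((N + (p - a)) - (p + 1)) = (N + (p - a)).choose (p + 1) :=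
      Nat.choose_symm (by omega)
    simp only [Function.comp_apply, pyComb, zero_add, Int.toNat_natCast, hT, hB, hPB, hcs]
    have hcast : (((a + 1 - j : ℕ)) : ℤ) = (1 + (a : ℤ)) - j := by
      push_cast [Nat.cast_sub (by omega : j ≤ a + 1)]; ring
    rw [hcast]
    ring
  rw [Finset.sum_congr rfl hL, ← sum_pows p hp N]
  exact Finset.sum_congr rfl (fun k _ => by ring)

-- ---- B's side: Stirling numbers of the second kind ----

def St : ℕ → ℕ → ℤ
  | 0, 0 => 1
  | 0, _ + 1 => 0
  | _ + 1, 0 => 0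
  | p + 1, k + 1 => St p k + ((k : ℤ) + 1) * St p (k + 1)

lemma St_vanish : ∀ p k : ℕ, p < k → St p k = 0 := by
  intro p
  induction p with
  | zero => intro k hk; obtain ⟨j, rfl⟩ : ∃ j, k = j + 1 := ⟨k - 1, by omega⟩; rfl
  | succ p ih =>
    intro k hk
    obtain ⟨j, rfl⟩ : ∃ j, k = j + 1 := ⟨k - 1, by omega⟩
    show St p j + ((j : ℤ) + 1) * St p (j + 1) = 0
    rw [ih j (by omega), ih (j + 1) (by omega)]
    ring

lemma St_diag : ∀ p : ℕ, St p p = 1 := by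
  intro p
  induction p with
  | zero => rfl
  | succ p ih =>
    show St p p + ((p : ℤ) + 1) * St p (p + 1) = 1
    rw [ih, St_vanish p (p + 1) (by omega)]
    ring

lemma i_mul_choose (i k : ℕ) :
    (i : ℤ) * (i.choose (k + 1) : ℤ)
      = ((k : ℤ) + 2) * (i.choose (k + 2) : ℤ) + ((k : ℤ) + 1) * (i.choose (k + 1) : ℤ) := by
  have h := chooseZ_succ_right i (k + 1)
  simp only [show k + 1 + 1 = k + 2 from rfl] at h
  push_cast at h
  linear_combination -h

lemma stirling_pow : ∀ p : ℕ, 1 ≤ p → ∀ i : ℕ,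
    (i : ℤ) ^ p = ∑ k ∈ Finset.range p,
      St p (k + 1) * ((k + 1).factorial : ℤ) * (i.choose (k + 1) : ℤ) := by
  intro p hp
  induction p, hp using Nat.le_induction with
  | base =>
    intro i
    have h11 : St 1 1 = 1 := rfl
    simp [h11, Nat.choose_one_right]
  | succ p hp ih =>
    intro i
    have hrec : ∀ k ∈ Finset.range (p + 1),
        St (p + 1) (k + 1) * ((k + 1).factorial : ℤ) * (i.choose (k + 1) : ℤ)
          = St p k * ((k + 1).factorial : ℤ) * (i.choose (k + 1) : ℤ)
            + ((k : ℤ) + 1) * (St p (k + 1) * ((k + 1).factorial : ℤ) * (i.choose (k + 1) : ℤ)) := by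
      intro k hk
      show (St p k + ((k : ℤ) + 1) * St p (k + 1)) * _ * _ = _
      ring
    rw [Finset.sum_congr rfl hrec, Finset.sum_add_distrib,
      Finset.sum_range_succ' (fun k => St p k * ((k + 1).factorial : ℤ) * (i.choose (k + 1) : ℤ)),
      Finset.sum_range_succ]
    have hz : St p 0 = 0 := by obtain ⟨q, rfl⟩ : ∃ q, p = q + 1 := ⟨p - 1, by omega⟩; rfl
    have hv : St p (p + 1) = 0 := St_vanish p (p + 1) (by omega)
    simp only [hz, hv, zero_mul, mul_zero, add_zero]
    have hfac : ∀ k : ℕ, (((k + 1) + 1).factorial : ℤ) = ((k : ℤ) + 2) * ((k + 1).factorial : ℤ) := by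
      intro k
      rw [Nat.factorial_succ]
      push_cast
      ring
    calc (i : ℤ) ^ (p + 1)
        = (∑ k ∈ Finset.range p, St p (k + 1) * ((k + 1).factorial : ℤ) * (i.choose (k + 1) : ℤ)) * i := by
          rw [pow_succ, ih]
      _ = ∑ k ∈ Finset.range p, St p (k + 1) * ((k + 1).factorial : ℤ) * ((i : ℤ) * (i.choose (k + 1) : ℤ)) := by
          rw [Finset.sum_mul]; exact Finset.sum_congr rfl (fun k _ => by ring)
      _ = ∑ k ∈ Finset.range p, (St p (k + 1) * (((k + 1) + 1).factorial : ℤ) * (i.choose ((k + 1) + 1) : ℤ)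
            + ((k : ℤ) + 1) * (St p (k + 1) * ((k + 1).factorial : ℤ) * (i.choose (k + 1) : ℤ))) := by
          refine Finset.sum_congr rfl (fun k _ => ?_)
          rw [i_mul_choose i k, hfac k]
          ring
      _ = _ := by rw [Finset.sum_add_distrib]

lemma sum_pows_st (p : ℕ) (hp : 1 ≤ p) : ∀ N : ℕ,
    ∑ x ∈ Finset.range N, ((x : ℤ) + 1) ^ p
      = ∑ k ∈ Finset.range p, St p (k + 1) * ((k + 1).factorial : ℤ) * ((N + 1).choose (k + 2) : ℤ) := by
  intro N
  induction N with
  | zero =>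
    simp only [Finset.range_zero, Finset.sum_empty]
    symm
    refine Finset.sum_eq_zero (fun k hk => ?_)
    have h0 : Nat.choose 1 (k + 2) = 0 := Nat.choose_eq_zero_of_lt (by omega)
    simp [h0]
  | succ N ih =>
    rw [Finset.sum_range_succ, ih]
    have hsplit : ∀ k ∈ Finset.range p,
        St p (k + 1) * ((k + 1).factorial : ℤ) * ((N + 1 + 1).choose (k + 2) : ℤ)
          = St p (k + 1) * ((k + 1).factorial : ℤ) * ((N + 1).choose (k + 2) : ℤ)
            + St p (k + 1) * ((k + 1).factorial : ℤ) * ((N + 1).choose (k + 1) : ℤ) := by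
      intro k hk
      have hc : ((N + 1 + 1).choose (k + 2) : ℕ) = (N + 1).choose (k + 1) + (N + 1).choose (k + 2) :=
        Nat.choose_succ_succ (N + 1) (k + 1)
      rw [hc]
      push_cast
      ring
    rw [Finset.sum_congr rfl hsplit, Finset.sum_add_distrib]
    have hw := stirling_pow p hp (N + 1)
    push_cast at hw
    rw [← hw]

-- the DP of Source B's loop: after processing p = 2..q the row is [S2(q,0), …, S2(q,q)]
lemma row_eval : ∀ q : ℕ, 1 ≤ q →
    (PySem.List.pyRange 2 ((q : ℤ) + 1) 1).foldl
      (fun row p => [0] ++ (PySem.List.pyRange 1 p 1).map (fun k =>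
        PySem.List.pyGetD row (k - 1) 0 + k * PySem.List.pyGetD row k 0) ++ [(1 : ℤ)]) [0, 1]
      = (List.range (q + 1)).map (fun k => St q k) := by
  intro q hq
  induction q, hq using Nat.le_induction with
  | base =>
    rw [PySem.List.pyRange_one_eq_nil (by omega)]
    rfl
  | succ q hq ih =>
    have hstep : ((q : ℤ) + 1) + 1 = (((q + 1 : ℕ) : ℤ)) + 1 := by push_cast; ring
    rw [← hstep, PySem.List.pyRange_one_succ_right (by omega), List.foldl_append, ih,
      List.foldl_cons, List.foldl_nil]
    rw [PySem.List.pyRange_one 1 ((q : ℤ) + 1)]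
    have e1 : (((q : ℤ) + 1) - 1).toNat = q := by omega
    rw [e1]
    have hmap : ((List.range q).map (fun k : ℕ => (1 : ℤ) + k)).map (fun k =>
          PySem.List.pyGetD ((List.range (q + 1)).map (fun k => St q k)) (k - 1) 0
            + k * PySem.List.pyGetD ((List.range (q + 1)).map (fun k => St q k)) k 0)
        = (List.range q).map (fun t => St (q + 1) (t + 1)) := by
      rw [List.map_map]
      refine List.map_congr_left (fun t ht => ?_)
      have htq : t < q := List.mem_range.mp ht
      simp only [Function.comp_apply]
      have hi1 : (1 : ℤ) + (t : ℤ) - 1 = ((t : ℕ) : ℤ) := by push_cast; ring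
      have hi2 : (1 : ℤ) + (t : ℤ) = (((t + 1 : ℕ) : ℕ) : ℤ) := by push_cast; ring
      rw [hi1, hi2, PySem.List.pyGetD_natCast, PySem.List.pyGetD_natCast,
        PySem.List.getD_map_range _ _ _ _ (by omega), PySem.List.getD_map_range _ _ _ _ (by omega)]
      show St q t + ((((t + 1 : ℕ) : ℕ) : ℤ)) * St q (t + 1) = St q t + ((t : ℤ) + 1) * St q (t + 1)
      push_cast
      ring
    rw [hmap]
    rw [List.range_succ_eq_map, List.range_succ]
    simp only [List.map_cons, List.map_append, List.map_map, Function.comp_def, List.map_nil]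
    rw [St_diag]
    rfl

-- B's formula-branch total equals the direct power-sum total (no mod), for 1 ≤ exp < n.
lemma key_formula_alt (n exp : Int) (h1 : 1 ≤ exp) (h2 : exp < n) :
    ((PySem.List.pyRange 1 (exp + 1) 1).map (fun k =>
        PySem.List.pyGetD
          ((PySem.List.pyRange 2 (exp + 1) 1).foldl
            (fun row p => [0] ++ (PySem.List.pyRange 1 p 1).map (fun k =>
              PySem.List.pyGetD row (k - 1) 0 + k * PySem.List.pyGetD row k 0) ++ [(1 : ℤ)]) [0, 1])
          k 0
        * ((k.toNat.factorial : ℕ) : Int) * pyComb (n + 1) (k + 1))).sum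
      = ((PySem.List.pyRange 1 (n + 1) 1).map (fun i => i ^ exp.toNat)).sum := by
  obtain ⟨p, rfl⟩ : ∃ p : ℕ, exp = (p : ℤ) := ⟨exp.toNat, (Int.toNat_of_nonneg (by omega)).symm⟩
  obtain ⟨N, rfl⟩ : ∃ N : ℕ, n = (N : ℤ) := ⟨n.toNat, (Int.toNat_of_nonneg (by omega)).symm⟩
  have hp : 1 ≤ p := by exact_mod_cast h1
  have hpN : p < N := by exact_mod_cast h2
  rw [row_eval p hp, PySem.List.pyRange_one 1 ((p : ℤ) + 1), PySem.List.pyRange_one 1 ((N : ℤ) + 1)]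
  have e1 : (((p : ℤ) + 1) - 1).toNat = p := by omega
  have e2 : (((N : ℤ) + 1) - 1).toNat = N := by omega
  rw [e1, e2, List.map_map, List.map_map, sum_map_range_eq, sum_map_range_eq]
  simp only [Function.comp_apply, Int.toNat_natCast]
  have hL : ∀ a ∈ Finset.range p,
      PySem.List.pyGetD ((List.range (p + 1)).map (fun k => St p k)) (1 + (a : ℤ)) 0
          * (((1 + (a : ℤ)).toNat.factorial : ℕ) : ℤ) * pyComb ((N : ℤ) + 1) ((1 + (a : ℤ)) + 1)
        = St p (a + 1) * (((a + 1).factorial : ℕ) : ℤ) * (((N + 1).choose (a + 2) : ℕ) : ℤ) := by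
    intro a ha
    have haW : a < p := Finset.mem_range.mp ha
    have hi : (1 : ℤ) + (a : ℤ) = (((a + 1 : ℕ) : ℕ) : ℤ) := by push_cast; ring
    rw [hi, PySem.List.pyGetD_natCast, PySem.List.getD_map_range _ _ _ _ (by omega)]
    have hfa : ((((a + 1 : ℕ) : ℤ)).toNat) = a + 1 := by omega
    have hcb : pyComb ((N : ℤ) + 1) ((((a + 1 : ℕ) : ℕ) : ℤ) + 1)
        = (((N + 1).choose (a + 2) : ℕ) : ℤ) := by
      unfold pyComb
      have t1 : ((N : ℤ) + 1).toNat = N + 1 := by omega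
      have t2 : ((((a + 1 : ℕ) : ℕ) : ℤ) + 1).toNat = a + 2 := by omega
      rw [t1, t2]
    rw [hfa, hcb]
  rw [Finset.sum_congr rfl hL, ← sum_pows_st p hp N]
  exact Finset.sum_congr rfl (fun k _ => by ring)

-- ===== VERDICT (by name: the statement is the Claim_ definition above) =====
theorem sumpow_spec : Claim_unchanged_sumpow := by
  intro n exp mod _ hpre hnd
  show sumpow n exp mod = sumpow_alt n exp mod
  unfold sumpow sumpow_alt
  by_cases hgt : n > exp
  · rw [if_pos hgt]
    by_cases hB : 0 ≤ exp ∧ exp < n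
    · rw [if_pos hB]
      by_cases he0 : exp = 0
      · -- A's formula loop is empty (returns 0); ¬D_ forces mod ∣ n, so B's n mod mod is 0 too
        subst he0
        rw [PySem.List.pyRange_one_eq_nil (by omega : (0:ℤ) + 1 ≤ 1), List.foldl_nil]
        unfold D_sumpow at hnd
        push Not at hnd
        have hdvd : mod ∣ n := hnd rfl (by omega)
        have hm : mod ≠ 0 := by rintro rfl; exact absurd (by simpa using hdvd) (by omega)
        simp only [ne_eq, hm, not_false_eq_true, if_true]
        exact ((PySem.Int.mod_eq_zero_iff_dvd n mod).mpr hdvd).symm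
      · -- 1 ≤ exp < n: both closed forms equal the direct power sum
        have h1 : 1 ≤ exp := by omega
        rw [if_neg he0]
        by_cases hm : mod = 0
        · simp only [hm, ne_eq, not_true_eq_false, if_false]
          have hin : ∀ (rv : ℤ), ∀ i ∈ PySem.List.pyRange 1 (exp + 1) 1,
              (PySem.List.pyRange 0 i 1).foldl (fun rv j =>
                  rv + (-1 : Int) ^ j.toNat * (i - j) ^ exp.toNat *
                    pyComb (n + exp - i + 1) (n - i) * pyComb (exp + 1) j) rv
                = rv + ((PySem.List.pyRange 0 i 1).map (fun j =>
                    (-1 : Int) ^ j.toNat * (i - j) ^ exp.toNat *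
                    pyComb (n + exp - i + 1) (n - i) * pyComb (exp + 1) j)).sum := fun rv i _ =>
            PySem.List.foldl_add _ _ rv
          rw [PySem.List.foldl_congr_mem _ _ _ _ hin, PySem.List.foldl_add, zero_add,
            key_formula n exp h1 hgt, key_formula_alt n exp h1 hgt]
        · simp only [ne_eq, hm, not_false_eq_true, if_true]
          have hin : ∀ (rv : ℤ), ∀ i ∈ PySem.List.pyRange 1 (exp + 1) 1,
              (PySem.List.pyRange 0 i 1).foldl (fun rv j =>
                  PySem.Int.mod (rv + (-1 : Int) ^ j.toNat * (i - j) ^ exp.toNat *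
                    pyComb (n + exp - i + 1) (n - i) * pyComb (exp + 1) j) mod) rv
                = PySem.Int.mod (rv + ((PySem.List.pyRange 0 i 1).map (fun j =>
                    (-1 : Int) ^ j.toNat * (i - j) ^ exp.toNat *
                    pyComb (n + exp - i + 1) (n - i) * pyComb (exp + 1) j)).sum) mod := by
            intro rv i hi
            have hi1 : 1 ≤ i := (PySem.List.mem_pyRange_one.mp hi).1
            exact foldl_mod_sum mod _ _ rv
              (by rw [PySem.List.pyRange_one_cons (by omega : (0:ℤ) < i)]; exact List.cons_ne_nil _ _)
          rw [PySem.List.foldl_congr_mem _ _ _ _ hin,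
            foldl_mod_sum mod _ _ 0
              (by rw [PySem.List.pyRange_one_cons (by omega : (1:ℤ) < exp + 1)]; exact List.cons_ne_nil _ _),
            zero_add, key_formula n exp h1 hgt, key_formula_alt n exp h1 hgt]
    · -- exp < 0 here, and Pre_ gives n ≤ 0: both loops are empty
      have hneg : exp < 0 := by omega
      have hn0 : n ≤ 0 := by rcases hpre with h | h <;> omega
      rw [if_neg hB, PySem.List.pyRange_one_eq_nil (by omega : exp + 1 ≤ 1), List.foldl_nil,
        PySem.List.pyRange_one_eq_nil (by omega : n + 1 ≤ 1), List.foldl_nil]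
  · -- n ≤ exp: A and B run the identical direct loop
    rw [if_neg hgt, if_neg (by omega : ¬(0 ≤ exp ∧ exp < n))]

theorem sumpow_changed : Claim_changed_sumpow := by
  unfold Claim_changed_sumpow; decide

theorem sumpow_tight : Claim_exact_sumpow := by
  intro n exp mod _ _ hd
  obtain ⟨he, hn, hnd⟩ := hd
  subst he
  unfold sumpow sumpow_alt
  rw [if_pos (by omega : n > 0), PySem.List.pyRange_one_eq_nil (by omega : (0:ℤ) + 1 ≤ 1),
    List.foldl_nil, if_pos (⟨le_refl 0, by omega⟩ : (0:ℤ) ≤ 0 ∧ (0:ℤ) < n), if_pos rfl]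
  by_cases hm : mod = 0
  · simp only [hm, ne_eq, not_true_eq_false, if_false]
    omega
  · simp only [ne_eq, hm, not_false_eq_true, if_true]
    intro h
    exact hnd ((PySem.Int.mod_eq_zero_iff_dvd n mod).mp h.symm)
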